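-- pv_equiv track=rewrite | github.com/seungminleeee/AlgoStudy | jun/2025.03/250317_귤 고르기.py | solution
-- ===== SOURCE A (Python) =====
-- from collections import Counter
--
-- def solution(k, tangerine):
--     counter = Counter(tangerine)
--     arr = sorted(counter.values(), reverse=True)
--
--     count = 0
--     kind = 0
--     for gyul in arr:
--         count += gyul
--         kind += 1
--
--         if count >= k:
--             return kind
-- ===== SOURCE B (Python) =====
-- from collections import Counter
--
-- def solution(k, tangerine):
--     # Counting-sort over frequency values: no comparison sort.
--     freq = Counter(Counter(tangerine).values())
--     count = 0
--     kind = 0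
--     for c in range(len(tangerine), 0, -1):
--         for _ in range(freq[c]):
--             count += c
--             kind += 1
--             if count >= k:
--                 return kind
-- ===== Notes on version B (the rewrite author's own statement) =====
-- stated objective: alternative
-- what changed: Replaces the comparison sort of the frequency values by a counting-sort sweep: a Counter of the frequency values is built and the sweep walks the possible counts from len(tangerine) down to 1, so no sorted() call is needed.
import Mathlib
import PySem

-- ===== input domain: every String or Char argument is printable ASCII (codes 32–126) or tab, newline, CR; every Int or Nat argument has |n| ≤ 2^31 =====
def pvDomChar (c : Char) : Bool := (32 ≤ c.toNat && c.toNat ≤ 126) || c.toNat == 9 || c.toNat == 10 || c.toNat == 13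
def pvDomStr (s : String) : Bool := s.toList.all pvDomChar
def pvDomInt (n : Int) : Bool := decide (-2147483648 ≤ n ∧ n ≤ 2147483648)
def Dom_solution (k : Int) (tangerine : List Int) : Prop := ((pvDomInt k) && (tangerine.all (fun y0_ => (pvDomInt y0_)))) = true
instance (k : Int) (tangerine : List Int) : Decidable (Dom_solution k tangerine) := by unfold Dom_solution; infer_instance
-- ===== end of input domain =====

-- B replaces the comparison sort of the frequency values by a counting-sort sweep over possible counts (alternative algorithm).

-- ===== PORT A =====
-- the for-loop over the descending-sorted frequency list; 0 is junk for the fall-off-the-end case (excluded by Pre_)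
def loopA (k : Int) : List Int → Int → Int → Int
  | [], _, _ => 0
  | g :: rest, count, kind =>
    if count + g ≥ k then kind + 1 else loopA k rest (count + g) (kind + 1)

def solution (k : Int) (tangerine : List Int) : Int :=
  let counter := PySem.Dict.counter tangerine
  let arr := PySem.List.sorted counter.values (fun x => x) true
  loopA k arr 0 0

-- ===== PORT B =====
-- inner 'for _ in range(freq[c])' loop: .inl = early return, .inr = loop state at normal exit
def loopBInner (k c : Int) : Nat → Int → Int → Sum Int (Int × Int)
  | 0, count, kind => .inr (count, kind)
  | n + 1, count, kind =>
    if count + c ≥ k then .inl (kind + 1)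
    else loopBInner k c n (count + c) (kind + 1)

def loopBOuter (k : Int) (freq : PySem.Dict Int Int) : List Int → Int → Int → Int
  | [], _, _ => 0
  | c :: cs, count, kind =>
    match loopBInner k c (freq.getD c 0).toNat count kind with
    | .inl r => r
    | .inr (count', kind') => loopBOuter k freq cs count' kind'

def solution_alt (k : Int) (tangerine : List Int) : Int :=
  let freq := PySem.Dict.counter (PySem.Dict.counter tangerine).values
  loopBOuter k freq (PySem.List.pyRange (tangerine.length : Int) 0 (-1)) 0 0

-- ===== PRECONDITION & SPEC =====
-- Pre_ excludes exactly the inputs (empty list, or k > total tangerine count) on which Python A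
-- falls off the loop and returns None, which is not a value of the declared Int type.
def Pre_solution (k : Int) (tangerine : List Int) : Prop :=
  tangerine ≠ [] ∧ k ≤ (tangerine.length : Int)
instance (k : Int) (tangerine : List Int) : Decidable (Pre_solution k tangerine) := by
  unfold Pre_solution; infer_instance
def pvWitness_solution : Int × List Int := (2, [1, 1, 2])

def Spec_solution (k : Int) (tangerine : List Int) (out : Int) : Prop := out = solution_alt k tangerine
instance (k : Int) (tangerine : List Int) (out : Int) : Decidable (Spec_solution k tangerine out) := by unfold Spec_solution; infer_instance

-- ===== CLAIM (what is proved, stated in full; the proofs are below) =====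
def Claim_equal_solution : Prop := ∀ (k : Int) (tangerine : List Int), Dom_solution k tangerine → Pre_solution k tangerine → Spec_solution k tangerine (solution k tangerine)

-- ===== LEMMAS AND PROOFS =====

-- A's loop over a block of n copies of c is B's inner loop
theorem loopA_replicate_append (k c : Int) :
    ∀ (n : Nat) (rest : List Int) (count kind : Int),
      loopA k (List.replicate n c ++ rest) count kind =
        match loopBInner k c n count kind with
        | .inl r => r
        | .inr (count', kind') => loopA k rest count' kind' := by
  intro n
  induction n with
  | zero => intro rest count kind; simp [loopBInner]
  | succ m ih =>
      intro rest count kind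
      simp only [List.replicate_succ, List.cons_append, loopA, loopBInner]
      by_cases h : count + c ≥ k
      · simp [h]
      · simp [h, ih]

-- B's double loop is A's loop over the flattened block list
theorem loopBOuter_eq_loopA (k : Int) (freq : PySem.Dict Int Int) :
    ∀ (cs : List Int) (count kind : Int),
      loopBOuter k freq cs count kind =
        loopA k (cs.flatMap fun c => List.replicate (freq.getD c 0).toNat c) count kind := by
  intro cs
  induction cs with
  | nil => intro count kind; simp [loopBOuter, loopA]
  | cons c cs ih =>
      intro count kind
      simp only [List.flatMap_cons, loopBOuter]
      rw [loopA_replicate_append]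
      cases h : loopBInner k c (freq.getD c 0).toNat count kind with
      | inl r => rfl
      | inr p => cases p; simp [ih]

theorem count_flat (ys : List Int) (v : Int) :
    ∀ cs : List Int, cs.Nodup →
      ((cs.flatMap fun c => List.replicate (ys.count c) c).count v) =
        if v ∈ cs then ys.count v else 0 := by
  intro cs
  induction cs with
  | nil => intro _; simp
  | cons c cs ih =>
      intro hnd
      rcases List.nodup_cons.mp hnd with ⟨hc, hnd'⟩
      simp only [List.flatMap_cons, List.count_append, ih hnd', List.count_replicate,
        List.mem_cons]
      by_cases hvc : v = c
      · subst hvc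
        simp [hc]
      · simp [hvc, Ne.symm hvc]

theorem flat_perm (ys : List Int) (cs : List Int) (hnd : cs.Nodup)
    (hmem : ∀ y ∈ ys, y ∈ cs) :
    (cs.flatMap fun c => List.replicate (ys.count c) c).Perm ys := by
  rw [List.perm_iff_count]
  intro v
  rw [count_flat ys v cs hnd]
  by_cases hv : v ∈ cs
  · simp [hv]
  · simp only [hv, if_false]
    symm
    rw [List.count_eq_zero]
    intro hvy
    exact hv (hmem v hvy)

theorem flat_pairwise (m : Int → Nat) :
    ∀ cs : List Int, cs.Pairwise (· > ·) →
      (cs.flatMap fun c => List.replicate (m c) c).Pairwise (fun a b => b ≤ a) := by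
  intro cs
  induction cs with
  | nil => intro _; simp
  | cons c cs ih =>
      intro hp
      rcases List.pairwise_cons.mp hp with ⟨hgt, hp'⟩
      simp only [List.flatMap_cons]
      rw [List.pairwise_append]
      refine ⟨List.pairwise_replicate.mpr (Or.inr le_rfl), ih hp', ?_⟩
      intro a ha b hb
      rw [List.eq_of_mem_replicate ha]
      rcases List.mem_flatMap.mp hb with ⟨d, hd, hb'⟩
      rw [List.eq_of_mem_replicate hb']
      exact le_of_lt (hgt d hd)

-- descending stable sort with the identity key is determined by the multiset
theorem sorted_rev_id_eq (xs ys : List Int) (hp : ys.Perm xs)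
    (hs : ys.Pairwise (fun a b => b ≤ a)) :
    PySem.List.sorted xs (fun x => x) true = ys := by
  exact ((PySem.List.sorted_perm xs (fun x => x) true).trans hp.symm).eq_of_pairwise
    (fun a b _ _ h1 h2 => le_antisymm h2 h1)
    (PySem.List.sorted_pairwise_rev xs (fun x => x)) hs

theorem pyRange_countdown_nodup (n : Int) : (PySem.List.pyRange n 0 (-1)).Nodup := by
  rw [PySem.List.pyRange_neg_one_eq_reverse]
  exact List.nodup_reverse.mpr (PySem.List.nodup_pyRange_one _ _)

theorem pyRange_countdown_pairwise (n : Int) :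
    (PySem.List.pyRange n 0 (-1)).Pairwise (· > ·) := by
  rw [PySem.List.pyRange_neg_one_eq_reverse]
  exact List.pairwise_reverse.mpr (PySem.List.pairwise_lt_pyRange_one _ _)

theorem values_counter_bounds (tangerine : List Int) :
    ∀ v ∈ (PySem.Dict.counter tangerine).values, 0 < v ∧ v ≤ (tangerine.length : Int) := by
  intro v hv
  have : (PySem.Dict.counter tangerine).values
      = (PySem.Dict.counter tangerine).items.map (·.2) := rfl
  rw [this, PySem.Dict.items_counter] at hv
  simp only [List.map_map, List.mem_map, Function.comp] at hv
  rcases hv with ⟨x, hx, hxv⟩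
  have hxmem : x ∈ tangerine := (PySem.Set.mem_ofList tangerine x).mp hx
  have h1 : 1 ≤ tangerine.count x := List.one_le_count_iff.mpr hxmem
  have h2 : tangerine.count x ≤ tangerine.length := List.count_le_length
  subst hxv
  constructor <;> simp <;> omega

theorem flat_eq_sorted (tangerine : List Int) :
    ((PySem.List.pyRange (tangerine.length : Int) 0 (-1)).flatMap
        fun c => List.replicate ((PySem.Dict.counter tangerine).values.count c) c)
      = PySem.List.sorted (PySem.Dict.counter tangerine).values (fun x => x) true := by
  symm
  apply sorted_rev_id_eq
  · exact flat_perm _ _ (pyRange_countdown_nodup _) (by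
      intro y hy
      rcases values_counter_bounds tangerine y hy with ⟨h1, h2⟩
      rw [PySem.List.mem_pyRange_neg_one]
      omega)
  · exact flat_pairwise _ _ (pyRange_countdown_pairwise _)

-- ===== VERDICT (by name: the statement is the Claim_ definition above) =====
theorem solution_spec : Claim_equal_solution := by
  intro k tangerine _ _
  show loopA k (PySem.List.sorted (PySem.Dict.counter tangerine).values (fun x => x) true) 0 0
      = loopBOuter k (PySem.Dict.counter (PySem.Dict.counter tangerine).values)
          (PySem.List.pyRange (tangerine.length : Int) 0 (-1)) 0 0
  rw [loopBOuter_eq_loopA]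
  simp only [PySem.Dict.getD_counter, Int.toNat_natCast]
  rw [flat_eq_sorted tangerine]
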